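-- pv_equiv track=rewrite | github.com/ecstrayer/nap-trap_paper | src/naptrap/db_features/kmer_counter.py | batch_kmers
-- ===== SOURCE A (Python) =====
-- class Unique_counter:
--
--     def __init__(self, kmax, reporter_id):
--
--         self.kmer_ids = ['reporter_id','position', 'kmer']
--         self.kmer_queue = [[] for n in range(kmax)]
--         self.kmax = kmax
--         self.reporter_id = reporter_id
--         self.all_kmers = []
--
--
--     def add_kmers(self, kmer_list):
--
--         self.kmer_queue = self.kmer_queue[1:] + [[]]
--         all_kmers = self.stored_kmers
--
--         kmer_list = [k for k in kmer_list if not k in all_kmers]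
--
--         for k in kmer_list:
--             self.kmer_queue[len(k) - 1].append(k)
--
--         self.all_kmers.append(kmer_list)
--
--
--     @property
--     def stored_kmers(self):
--         return set([k for i in self.kmer_queue for k in i])
--
--     @property
--     def get_kmer_counts(self):
--         kmer_counts = []
--         for i, kl in enumerate(self.all_kmers):
--             for k in kl:
--                 kmer_counts.append(tuple([self.reporter_id, i, k]))
--
--         return kmer_counts
--
-- def batch_kmers(reporters, kmax = 8):
--
--     kmer_data = []
--
--     for reporter_id, seq in reporters:
--         seqlen = len(seq)
--         ucounter = Unique_counter(kmax, reporter_id)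
--
--         for i in range(seqlen):
--             km = seqlen - i if i + kmax > seqlen else kmax
--             kmers = [seq[i:i+x] for x in range(1, km + 1)]
--             ucounter.add_kmers(kmers)
--
--         kmer_data += ucounter.get_kmer_counts
--
--     kmer_ids = ucounter.kmer_ids
--     return kmer_ids, kmer_data
-- ===== SOURCE B (Python) =====
-- def batch_kmers(reporters, kmax=8):
--     # One pass per sequence with a dict of each kmer's last emitted position:
--     # a kmer of length x emitted at position j suppresses re-emission at
--     # positions j+1 .. j+x-1, so "s was emitted at some position > i - x"
--     # is equivalent to "last[s] > i - x".
--     kmer_data = []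
--     for reporter_id, seq in reporters:
--         n = len(seq)
--         last = {}
--         for i in range(n):
--             km = n - i if i + kmax > n else kmax
--             for x in range(1, km + 1):
--                 s = seq[i:i + x]
--                 if s not in last or last[s] <= i - x:
--                     last[s] = i
--                     kmer_data.append((reporter_id, i, s))
--     return ['reporter_id', 'position', 'kmer'], kmer_data
-- ===== Notes on version B (the rewrite author's own statement) =====
-- stated objective: faster
-- what changed: Instead of keeping a queue of kmax age-buckets and rebuilding the whole sliding-window kmer set at every position, B keeps one dict mapping each kmer to the position where it was last emitted and tests 'last[s] <= i - len(s)', which is equivalent to the window-set membership test; intended as faster (a timing run measured B ~2.8-5x faster where both finish, with A timing out at sizes B completes).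
-- outside the precondition, e.g. on batch_kmers([], 8): A raises UnboundLocalError, B returns (['reporter_id', 'position', 'kmer'], [])
import Mathlib
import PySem

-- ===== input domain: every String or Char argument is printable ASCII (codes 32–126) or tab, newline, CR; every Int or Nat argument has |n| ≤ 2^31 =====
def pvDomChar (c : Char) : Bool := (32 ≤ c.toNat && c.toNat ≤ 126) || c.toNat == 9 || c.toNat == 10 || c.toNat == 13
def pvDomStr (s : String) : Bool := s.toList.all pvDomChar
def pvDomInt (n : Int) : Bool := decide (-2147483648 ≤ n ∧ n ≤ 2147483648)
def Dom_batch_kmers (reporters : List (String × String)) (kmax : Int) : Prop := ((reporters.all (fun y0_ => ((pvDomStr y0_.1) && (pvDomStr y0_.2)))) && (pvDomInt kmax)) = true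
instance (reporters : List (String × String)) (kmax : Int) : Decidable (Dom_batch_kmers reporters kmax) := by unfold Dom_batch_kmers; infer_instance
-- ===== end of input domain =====

-- B replaces A's per-position rebuild of the sliding-window kmer set (queue of age
-- buckets) by a single dict of last-emitted positions; equivalence proved on
-- reporters ≠ [] (A raises UnboundLocalError on []).

-- ===== PORT A =====
-- Unique_counter state = (kmer_queue, all_kmers); kmer_ids/kmax/reporter_id are constants.
-- __init__: kmer_queue = [[] for n in range(kmax)], all_kmers = []
def ucInit (kmax : Int) : List (List String) × List (List String) :=
  ((PySem.List.pyRange 0 kmax 1).map (fun _ => ([] : List String)), [])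

-- self.kmer_queue[len(k) - 1].append(k)  (in-place append on the indexed bucket)
def ucPlace (q : List (List String)) (k : String) : List (List String) :=
  PySem.List.pySetD q (PySem.Str.len k - 1)
    (PySem.List.pyGetD q (PySem.Str.len k - 1) [] ++ [k])

-- add_kmers
def ucAddKmers (st : List (List String) × List (List String)) (kmer_list : List String) :
    List (List String) × List (List String) :=
  let q := PySem.List.slice st.1 (some 1) none ++ [[]]
  let all_kmers : PySem.Set String := PySem.Set.ofList (q.flatMap (fun i => i))
  let kl := kmer_list.filter (fun k => !(PySem.Set.contains all_kmers k))
  let q' := kl.foldl ucPlace q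
  (q', st.2 ++ [kl])

-- get_kmer_counts
def ucGetKmerCounts (reporter_id : String) (all_kmers : List (List String)) :
    List (String × Int × String) :=
  (PySem.List.enumerate all_kmers 0).foldl
    (fun acc p => p.2.foldl (fun acc2 k => acc2 ++ [(reporter_id, p.1, k)]) acc) []

def batch_kmers (reporters : List (String × String)) (kmax : Int) :
    List String × List (String × Int × String) :=
  let kmer_data := reporters.foldl (fun kmer_data p =>
    let seqlen := PySem.Str.len p.2
    let uc := (PySem.List.pyRange 0 seqlen 1).foldl (fun st i =>
      let km := if i + kmax > seqlen then seqlen - i else kmax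
      let kmers := (PySem.List.pyRange 1 (km + 1) 1).map
        (fun x => PySem.Str.slice p.2 (some i) (some (i + x)))
      ucAddKmers st kmers) (ucInit kmax)
    kmer_data ++ ucGetKmerCounts p.1 uc.2) []
  -- kmer_ids is the constant Unique_counter field; on reporters = [] Python raises (outside Pre_)
  (["reporter_id", "position", "kmer"], kmer_data)

-- ===== PORT B =====
def batch_kmers_alt (reporters : List (String × String)) (kmax : Int) :
    List String × List (String × Int × String) :=
  let kmer_data := reporters.foldl (fun acc p =>
    let n := PySem.Str.len p.2
    ((PySem.List.pyRange 0 n 1).foldl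
      (fun (st : PySem.Dict String Int × List (String × Int × String)) i =>
        let km := if i + kmax > n then n - i else kmax
        (PySem.List.pyRange 1 (km + 1) 1).foldl (fun st x =>
          let s := PySem.Str.slice p.2 (some i) (some (i + x))
          match PySem.Dict.get? st.1 s with
          | none => (PySem.Dict.insert st.1 s i, st.2 ++ [(p.1, i, s)])
          | some j =>
            if j ≤ i - x then (PySem.Dict.insert st.1 s i, st.2 ++ [(p.1, i, s)])
            else st) st)
      (PySem.Dict.empty, acc)).2) []
  (["reporter_id", "position", "kmer"], kmer_data)

-- ===== PRECONDITION & SPEC =====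
-- A reads the loop variable `ucounter` after the loop, so it raises UnboundLocalError
-- on reporters = []; Pre_ excludes exactly that input.
def Pre_batch_kmers (reporters : List (String × String)) (kmax : Int) : Prop :=
  reporters ≠ []
instance (reporters : List (String × String)) (kmax : Int) : Decidable (Pre_batch_kmers reporters kmax) := by unfold Pre_batch_kmers; infer_instance

def pvWitness_batch_kmers : (List (String × String)) × Int := ([("r1", "abab")], 2)

def Spec_batch_kmers (reporters : List (String × String)) (kmax : Int) (out : List String × (List (String × Int × String))) : Prop := out = batch_kmers_alt reporters kmax
instance (reporters : List (String × String)) (kmax : Int) (out : List String × (List (String × Int × String))) : Decidable (Spec_batch_kmers reporters kmax out) := by unfold Spec_batch_kmers; infer_instance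

-- ===== CLAIM (what is proved, stated in full; the proofs are below) =====
def Claim_equal_batch_kmers : Prop := ∀ (reporters : List (String × String)) (kmax : Int), Dom_batch_kmers reporters kmax → Pre_batch_kmers reporters kmax → Spec_batch_kmers reporters kmax (batch_kmers reporters kmax)


-- ===== LEMMAS AND PROOFS =====

-- length of a kmer as a Nat
def lenC (s : String) : Nat := s.toList.length

-- the slice seq[i:i+x]
def sl (seq : String) (i x : Int) : String := PySem.Str.slice seq (some i) (some (i + x))

-- A's per-position step (literally the body of batch_kmers' inner loop)
def astep (seq : String) (kmax : Int) (st : List (List String) × List (List String)) (i : Int) :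
    List (List String) × List (List String) :=
  let seqlen := PySem.Str.len seq
  let km := if i + kmax > seqlen then seqlen - i else kmax
  let kmers := (PySem.List.pyRange 1 (km + 1) 1).map
    (fun x => PySem.Str.slice seq (some i) (some (i + x)))
  ucAddKmers st kmers

-- B's per-kmer step (literally the body of batch_kmers_alt's innermost loop)
def bstep (rid seq : String) (i : Int)
    (st : PySem.Dict String Int × List (String × Int × String)) (x : Int) :
    PySem.Dict String Int × List (String × Int × String) :=
  let s := PySem.Str.slice seq (some i) (some (i + x))
  match PySem.Dict.get? st.1 s with
  | none => (PySem.Dict.insert st.1 s i, st.2 ++ [(rid, i, s)])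
  | some j =>
    if j ≤ i - x then (PySem.Dict.insert st.1 s i, st.2 ++ [(rid, i, s)])
    else st

-- B's per-position step
def bpos (rid seq : String) (kmax : Int)
    (st : PySem.Dict String Int × List (String × Int × String)) (i : Int) :
    PySem.Dict String Int × List (String × Int × String) :=
  let n := PySem.Str.len seq
  let km := if i + kmax > n then n - i else kmax
  (PySem.List.pyRange 1 (km + 1) 1).foldl (bstep rid seq i) st

-- tag the emitted lists with positions starting at i0
def tagF (rid : String) : Int → List (List String) → List (String × Int × String)
  | _, [] => []
  | i0, e :: ls => e.map (fun k => (rid, i0, k)) ++ tagF rid (i0 + 1) ls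

-- state invariant relating A's bucket queue (pre-shift, i positions done) to B's dict
def QInv (i : Nat) (q : List (List String)) (last : PySem.Dict String Int) : Prop :=
  (∀ (b : Nat) (s : String), s ∈ q.getD b [] →
     1 ≤ lenC s ∧ b + 1 ≤ lenC s ∧
     PySem.Dict.get? last s = some ((i : Int) - lenC s + b)) ∧
  (∀ (s : String) (j : Int), PySem.Dict.get? last s = some j →
     0 ≤ j ∧ j + 1 ≤ (i : Int) ∧ ((i : Int) - lenC s ≤ j → ∃ b, s ∈ q.getD b []))


-- ---- basic helpers ----

lemma len_sl (seq : String) (i x : Int) (h0 : 0 ≤ i) (h1 : 0 ≤ x)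
    (h2 : i + x ≤ (seq.toList.length : Int)) : lenC (sl seq i x) = x.toNat := by
  unfold sl lenC PySem.Str.slice
  rw [String.toList_ofList]
  show (PySem.List.slice seq.toList (some i) (some (i + x))).length = x.toNat
  rw [PySem.List.slice_toNat (xs := seq.toList) h0 (by omega)]
  rw [List.length_take, List.length_drop]
  omega

lemma mem_shift (q : List (List String)) (b : Nat) (s : String) :
    s ∈ (q.tail ++ [([] : List String)]).getD b [] ↔ s ∈ q.getD (b + 1) [] := by
  by_cases hb : b < q.tail.length
  · have hq : b + 1 < q.length := by
      have := List.length_tail (l := q); omega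
    rw [List.getD_eq_getElem?_getD, List.getD_eq_getElem?_getD,
      List.getElem?_append, if_pos hb, List.getElem?_tail]
  · have h1 : q.tail.length = q.length - 1 := List.length_tail
    rw [List.getD_eq_getElem?_getD, List.getD_eq_getElem?_getD,
      List.getElem?_append, if_neg hb]
    have h2 : (q[b+1]? : Option (List String)) = none := by
      apply List.getElem?_eq_none; omega
    rw [h2]
    rcases Nat.lt_or_ge (b - q.tail.length) 1 with h | h
    · simp
    · have h3 : ([([] : List String)])[b - q.tail.length]? = none := by
        apply List.getElem?_eq_none; simpa using h
      rw [h3]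

lemma mem_flatMap_getD (l : List (List String)) (s : String) :
    s ∈ l.flatMap (fun kl => kl) ↔ ∃ b, s ∈ l.getD b [] := by
  rw [List.mem_flatMap]
  constructor
  · rintro ⟨a, ha, hs⟩
    rcases List.mem_iff_getElem.mp ha with ⟨b, hb, rfl⟩
    exact ⟨b, by rw [List.getD_eq_getElem?_getD, List.getElem?_eq_getElem hb]; exact hs⟩
  · rintro ⟨b, hs⟩
    by_cases hb : b < l.length
    · exact ⟨l[b], List.getElem_mem hb, by
        rwa [List.getD_eq_getElem?_getD, List.getElem?_eq_getElem hb] at hs⟩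
    · rw [List.getD_eq_getElem?_getD, List.getElem?_eq_none (by omega)] at hs
      simp at hs

-- ---- queue insertion (A side) ----

lemma length_ucPlace (q : List (List String)) (k : String) :
    (ucPlace q k).length = q.length := by
  unfold ucPlace
  rw [PySem.List.length_pySetD]

lemma ucPlace_getD (q : List (List String)) (k : String) (b : Nat)
    (h1 : 1 ≤ lenC k) (h2 : lenC k ≤ q.length) :
    (ucPlace q k).getD b [] =
      if b + 1 = lenC k then q.getD b [] ++ [k] else q.getD b [] := by
  unfold ucPlace
  have hidx0 : PySem.Str.len k = (lenC k : Int) := by rw [PySem.Str.len_eq]; rfl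
  have hidx : PySem.Str.len k - 1 = ((lenC k - 1 : Nat) : Int) := by rw [hidx0]; omega
  rw [hidx, PySem.List.pySetD_natCast, PySem.List.pyGetD_natCast]
  have hlt : lenC k - 1 < q.length := by omega
  rw [List.getD_eq_getElem?_getD (l := q.set _ _), List.getElem?_set]
  by_cases hb : lenC k - 1 = b
  · have hb' : b + 1 = lenC k := by omega
    rw [if_pos hb, if_pos hlt, if_pos hb', Option.getD_some, hb]
  · have hb' : ¬ (b + 1 = lenC k) := by omega
    rw [if_neg hb, if_neg hb', List.getD_eq_getElem?_getD]

lemma foldl_ucPlace_length (kl : List String) (q : List (List String)) :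
    (kl.foldl ucPlace q).length = q.length := by
  induction kl generalizing q with
  | nil => rfl
  | cons k kl ih => rw [List.foldl_cons, ih, length_ucPlace]

lemma mem_foldl_ucPlace (kl : List String) (q : List (List String)) (b : Nat) (s : String)
    (h : ∀ k ∈ kl, 1 ≤ lenC k ∧ lenC k ≤ q.length) :
    s ∈ (kl.foldl ucPlace q).getD b [] ↔
      s ∈ q.getD b [] ∨ (s ∈ kl ∧ lenC s = b + 1) := by
  induction kl generalizing q with
  | nil => simp
  | cons k kl ih =>
    rw [List.foldl_cons]
    have hk := h k (by simp)
    rw [ih _ (fun k' hk' => by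
      rw [length_ucPlace]; exact h k' (by simp [hk']))]
    rw [ucPlace_getD q k b hk.1 hk.2]
    by_cases hb : b + 1 = lenC k
    · rw [if_pos hb]
      simp only [List.mem_append, List.mem_cons, List.not_mem_nil, or_false]
      constructor
      · rintro ((hq | rfl) | ⟨hkl, hl⟩)
        · exact Or.inl hq
        · exact Or.inr ⟨Or.inl rfl, by omega⟩
        · exact Or.inr ⟨Or.inr hkl, hl⟩
      · rintro (hq | ⟨(rfl | hkl), hl⟩)
        · exact Or.inl (Or.inl hq)
        · exact Or.inl (Or.inr rfl)
        · exact Or.inr ⟨hkl, hl⟩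
    · rw [if_neg hb]
      simp only [List.mem_cons]
      constructor
      · rintro (hq | ⟨hkl, hl⟩)
        · exact Or.inl hq
        · exact Or.inr ⟨Or.inr hkl, hl⟩
      · rintro (hq | ⟨(rfl | hkl), hl⟩)
        · exact Or.inl hq
        · exact absurd hl (by omega)
        · exact Or.inr ⟨hkl, hl⟩

-- ---- dict insertion (B side) ----

lemma get?_foldl_insert (ks : List String) (d : PySem.Dict String Int) (v : Int) (s : String) :
    (ks.foldl (fun dd k => dd.insert k v) d).get? s =
      if s ∈ ks then some v else PySem.Dict.get? d s := by
  induction ks generalizing d with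
  | nil => simp
  | cons k ks ih =>
    rw [List.foldl_cons, ih]
    by_cases hs : s ∈ ks
    · simp [hs]
    · by_cases he : s = k
      · subst he
        simp [hs]
      · rw [PySem.Dict.get?_insert]
        simp [hs, he]


-- ---- suppression test equivalence ----

lemma mem_window_iff (i : Nat) (q : List (List String)) (last : PySem.Dict String Int)
    (hInv : QInv i q last) (s : String) :
    s ∈ (q.tail ++ [([] : List String)]).flatMap (fun kl => kl) ↔
      ∃ j, PySem.Dict.get? last s = some j ∧ (i : Int) - lenC s + 1 ≤ j := by
  obtain ⟨I1, I2⟩ := hInv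
  rw [mem_flatMap_getD]
  constructor
  · rintro ⟨b, hb⟩
    rw [mem_shift] at hb
    obtain ⟨_, _, hg⟩ := I1 (b + 1) s hb
    exact ⟨_, hg, by push_cast; omega⟩
  · rintro ⟨j, hj, hge⟩
    obtain ⟨_, _, hex⟩ := I2 s j hj
    obtain ⟨b, hb⟩ := hex (by omega)
    obtain ⟨_, _, hg⟩ := I1 b s hb
    rw [hj] at hg
    have hbpos : 1 ≤ b := by
      have := Option.some.inj hg
      omega
    obtain ⟨b', rfl⟩ : ∃ b', b = b' + 1 := ⟨b - 1, by omega⟩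
    exact ⟨b', (mem_shift q b' s).mpr hb⟩

lemma test_eq (i : Nat) (q : List (List String)) (last : PySem.Dict String Int)
    (hInv : QInv i q last) (s : String) :
    (match PySem.Dict.get? last s with
     | none => true
     | some j => decide (j ≤ (i : Int) - lenC s))
    = !(PySem.Set.contains
        (PySem.Set.ofList ((q.tail ++ [([] : List String)]).flatMap (fun kl => kl))) s) := by
  have hw := mem_window_iff i q last hInv s
  have hc : PySem.Set.contains
      (PySem.Set.ofList ((q.tail ++ [([] : List String)]).flatMap (fun kl => kl))) s
      = decide (s ∈ (q.tail ++ [([] : List String)]).flatMap (fun kl => kl)) := by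
    by_cases hm : s ∈ (q.tail ++ [([] : List String)]).flatMap (fun kl => kl)
    · exact ((PySem.Set.contains_iff _ _).mpr
        ((PySem.Set.mem_ofList _ _).mpr hm)).trans (decide_eq_true hm).symm
    · have h1 : ¬ PySem.Set.contains
          (PySem.Set.ofList ((q.tail ++ [([] : List String)]).flatMap (fun kl => kl))) s = true :=
        fun h => hm ((PySem.Set.mem_ofList _ _).mp ((PySem.Set.contains_iff _ _).mp h))
      exact (Bool.eq_false_iff.mpr h1).trans (decide_eq_false hm).symm
  rw [hc]
  cases hg : PySem.Dict.get? last s with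
  | none =>
    have hnm : ¬ s ∈ (q.tail ++ [([] : List String)]).flatMap (fun kl => kl) := by
      rw [hw]; rintro ⟨j, hj, _⟩; rw [hg] at hj; simp at hj
    rw [decide_eq_false hnm]; rfl
  | some j =>
    by_cases hle : j ≤ (i : Int) - lenC s
    · have hnm : ¬ s ∈ (q.tail ++ [([] : List String)]).flatMap (fun kl => kl) := by
        rw [hw]; rintro ⟨j', hj', hge⟩; rw [hg] at hj'
        have := Option.some.inj hj'; omega
      rw [decide_eq_false hnm]; exact decide_eq_true hle
    · have hm : s ∈ (q.tail ++ [([] : List String)]).flatMap (fun kl => kl) := by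
        rw [hw]; exact ⟨j, hg, by omega⟩
      rw [decide_eq_true hm]; exact decide_eq_false hle

-- ---- B's inner fold over one position ----

lemma foldB_eq (rid seq : String) (i : Int) (last : PySem.Dict String Int) (P : String → Bool)
    (hi : 0 ≤ i) :
    ∀ (xs : List Int) (d : PySem.Dict String Int) (acc : List (String × Int × String)),
    (∀ x ∈ xs, 1 ≤ x ∧ i + x ≤ (seq.toList.length : Int)) → xs.Nodup →
    (∀ x ∈ xs, (match PySem.Dict.get? last (sl seq i x) with
                | none => true
                | some j => decide (j ≤ i - x)) = P (sl seq i x)) →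
    (∀ x ∈ xs, PySem.Dict.get? d (sl seq i x) = PySem.Dict.get? last (sl seq i x)) →
    xs.foldl (bstep rid seq i) (d, acc) =
      ((xs.filter (fun x => P (sl seq i x))).foldl (fun dd x => dd.insert (sl seq i x) i) d,
       acc ++ (xs.filter (fun x => P (sl seq i x))).map (fun x => (rid, i, sl seq i x))) := by
  intro xs
  induction xs with
  | nil => intro d acc _ _ _ _; simp
  | cons x xs ih =>
    intro d acc hx hnd heq hag
    have hx0 := hx x (by simp)
    have hslne : ∀ x' ∈ xs, sl seq i x' ≠ sl seq i x := by
      intro x' hx'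
      have hx'0 := hx x' (by simp [hx'])
      intro hcon
      have l1 : lenC (sl seq i x') = x'.toNat := len_sl seq i x' hi (by omega) hx'0.2
      have l2 : lenC (sl seq i x) = x.toNat := len_sl seq i x hi (by omega) hx0.2
      rw [hcon, l2] at l1
      have : x = x' := by omega
      subst this
      exact (List.nodup_cons.mp hnd).1 hx'
    have e1 : bstep rid seq i (d, acc) x =
        (match PySem.Dict.get? last (sl seq i x) with
         | none => (d.insert (sl seq i x) i, acc ++ [(rid, i, sl seq i x)])
         | some j => if j ≤ i - x then (d.insert (sl seq i x) i, acc ++ [(rid, i, sl seq i x)])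
                     else (d, acc)) := by
      show (match PySem.Dict.get? d (sl seq i x) with
         | none => (d.insert (sl seq i x) i, acc ++ [(rid, i, sl seq i x)])
         | some j => if j ≤ i - x then (d.insert (sl seq i x) i, acc ++ [(rid, i, sl seq i x)])
                     else (d, acc)) = _
      rw [hag x (by simp)]
    have e2 : (match PySem.Dict.get? last (sl seq i x) with
         | none => (d.insert (sl seq i x) i, acc ++ [(rid, i, sl seq i x)])
         | some j => if j ≤ i - x then (d.insert (sl seq i x) i, acc ++ [(rid, i, sl seq i x)])
                     else (d, acc)) =
        if P (sl seq i x) then (d.insert (sl seq i x) i, acc ++ [(rid, i, sl seq i x)])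
        else (d, acc) := by
      rw [show P (sl seq i x) = (match PySem.Dict.get? last (sl seq i x) with
         | none => true
         | some j => decide (j ≤ i - x)) from (heq x (by simp)).symm]
      cases PySem.Dict.get? last (sl seq i x) with
      | none => simp
      | some j => by_cases hle : j ≤ i - x <;> simp [hle]
    have hbody := e1.trans e2
    rw [List.foldl_cons, hbody]
    by_cases hP : P (sl seq i x)
    · rw [if_pos hP]
      rw [ih (d.insert (sl seq i x) i) (acc ++ [(rid, i, sl seq i x)])
        (fun x' h' => hx x' (by simp [h'])) (List.nodup_cons.mp hnd).2
        (fun x' h' => heq x' (by simp [h']))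
        (fun x' h' => by
          rw [PySem.Dict.get?_insert]
          rw [if_neg (hslne x' h')]
          exact hag x' (by simp [h']))]
      simp [hP]
    · rw [if_neg hP]
      rw [ih d acc (fun x' h' => hx x' (by simp [h'])) (List.nodup_cons.mp hnd).2
        (fun x' h' => heq x' (by simp [h'])) (fun x' h' => hag x' (by simp [h']))]
      simp [hP]



-- ---- invariant preservation over one position ----

lemma inv_step (i : Nat) (q : List (List String)) (last : PySem.Dict String Int)
    (hInv : QInv i q last) (e : List String)
    (he : ∀ k ∈ e, 1 ≤ lenC k ∧ lenC k ≤ (q.tail ++ [([] : List String)]).length)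
    (hnot : ∀ k ∈ e, ¬ k ∈ (q.tail ++ [([] : List String)]).flatMap (fun kl => kl)) :
    QInv (i + 1) (e.foldl ucPlace (q.tail ++ [([] : List String)]))
      (e.foldl (fun dd k => dd.insert k (i : Int)) last) := by
  obtain ⟨I1, I2⟩ := hInv
  constructor
  · intro b s hs
    rw [mem_foldl_ucPlace e _ b s he] at hs
    rcases hs with hold | ⟨hse, hlen⟩
    · rw [mem_shift] at hold
      obtain ⟨h1, h2, h3⟩ := I1 (b + 1) s hold
      have hnotse : ¬ s ∈ e := fun hcon =>
        hnot s hcon ((mem_flatMap_getD _ s).mpr ⟨b, (mem_shift q b s).mpr hold⟩)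
      refine ⟨h1, by omega, ?_⟩
      rw [get?_foldl_insert, if_neg hnotse, h3]
      congr 1
      push_cast
      ring
    · obtain ⟨h1, h2⟩ := he s hse
      refine ⟨by omega, by omega, ?_⟩
      rw [get?_foldl_insert, if_pos hse]
      congr 1
      push_cast
      omega
  · intro s j hj
    rw [get?_foldl_insert] at hj
    by_cases hse : s ∈ e
    · rw [if_pos hse] at hj
      have hji : j = (i : Int) := (Option.some.inj hj).symm
      subst hji
      obtain ⟨h1, h2⟩ := he s hse
      refine ⟨by exact_mod_cast Nat.zero_le i, by push_cast; omega, ?_⟩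
      intro _
      refine ⟨lenC s - 1, ?_⟩
      rw [mem_foldl_ucPlace e _ _ s he]
      exact Or.inr ⟨hse, by omega⟩
    · rw [if_neg hse] at hj
      obtain ⟨h1, h2, h3⟩ := I2 s j hj
      refine ⟨h1, by push_cast; omega, ?_⟩
      intro hge
      obtain ⟨b, hb⟩ := h3 (by push_cast at hge ⊢; omega)
      obtain ⟨g1, g2, g3⟩ := I1 b s hb
      rw [hj] at g3
      have hval := Option.some.inj g3
      have hb1 : 1 ≤ b := by
        push_cast at hge
        omega
      obtain ⟨b', rfl⟩ : ∃ b', b = b' + 1 := ⟨b - 1, by omega⟩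
      refine ⟨b', ?_⟩
      rw [mem_foldl_ucPlace e _ _ s he]
      exact Or.inl ((mem_shift q b' s).mpr hb)

-- ---- one full position step, both sides ----

lemma astep_eq (seq : String) (kmax i km : Int)
    (hkm : km = if i + kmax > (seq.toList.length : Int) then (seq.toList.length : Int) - i else kmax)
    (q : List (List String)) (all : List (List String)) :
    astep seq kmax (q, all) i =
      ((((PySem.List.pyRange 1 (km + 1)).map (fun x => sl seq i x)).filter
          (fun s => !(PySem.Set.contains (PySem.Set.ofList
            ((q.tail ++ [([] : List String)]).flatMap (fun kl => kl))) s))).foldl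
          ucPlace (q.tail ++ [([] : List String)]),
       all ++ [(((PySem.List.pyRange 1 (km + 1)).map (fun x => sl seq i x)).filter
          (fun s => !(PySem.Set.contains (PySem.Set.ofList
            ((q.tail ++ [([] : List String)]).flatMap (fun kl => kl))) s)))]) := by
  subst hkm
  simp only [astep, ucAddKmers]
  rw [PySem.Str.len_eq, PySem.List.slice_from_one]
  rfl

lemma bpos_eq (rid seq : String) (kmax i km : Int)
    (hkm : km = if i + kmax > (seq.toList.length : Int) then (seq.toList.length : Int) - i else kmax)
    (last : PySem.Dict String Int) (acc : List (String × Int × String)) :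
    bpos rid seq kmax (last, acc) i =
      (PySem.List.pyRange 1 (km + 1)).foldl (bstep rid seq i) (last, acc) := by
  subst hkm
  simp only [bpos]
  rw [PySem.Str.len_eq]

lemma step_all (rid seq : String) (kmax : Int) (i : Nat)
    (q : List (List String)) (last : PySem.Dict String Int)
    (hInv : QInv i q last) (hlen : kmax ≤ (q.length : Int)) :
    ∃ (e : List String) (q' : List (List String)) (last' : PySem.Dict String Int),
      (∀ all, astep seq kmax (q, all) (i : Int) = (q', all ++ [e])) ∧
      (∀ acc, bpos rid seq kmax (last, acc) (i : Int) =
        (last', acc ++ e.map (fun k => (rid, (i : Int), k)))) ∧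
      QInv (i + 1) q' last' ∧ kmax ≤ ((q'.length : Nat) : Int) := by
  set n : Int := (seq.toList.length : Int) with hn
  set km : Int := if (i : Int) + kmax > n then n - (i : Int) else kmax with hkm
  set q1 : List (List String) := q.tail ++ [([] : List String)] with hq1
  set P : String → Bool :=
    fun s => !(PySem.Set.contains (PySem.Set.ofList (q1.flatMap (fun kl => kl))) s) with hP
  set xs : List Int := PySem.List.pyRange 1 (km + 1) with hxs
  set e : List String := (xs.map (fun x => sl seq (i : Int) x)).filter P with he
  have hi0 : (0 : Int) ≤ (i : Int) := by exact_mod_cast Nat.zero_le i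
  have hxfact : ∀ x ∈ xs, 1 ≤ x ∧ (i : Int) + x ≤ n ∧ x ≤ kmax := by
    intro x hx
    rw [hxs, PySem.List.mem_pyRange_one] at hx
    have hkm2 : km ≤ n - (i : Int) ∧ km ≤ kmax := by
      rw [hkm]
      split_ifs with h
      · exact ⟨by omega, by omega⟩
      · refine ⟨by rw [hn] at h ⊢; omega, by omega⟩
    exact ⟨hx.1, by omega, by omega⟩
  have hq1len : q.length ≤ q1.length ∧ kmax ≤ (q1.length : Int) := by
    rw [hq1, List.length_append, List.length_tail, List.length_singleton]
    exact ⟨by omega, by omega⟩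
  have hlensl : ∀ x ∈ xs, lenC (sl seq (i : Int) x) = x.toNat := by
    intro x hx
    obtain ⟨hx1, hx2, _⟩ := hxfact x hx
    exact len_sl seq (i : Int) x hi0 (by omega) (by rw [← hn]; exact hx2)
  have hee : ∀ s' ∈ e, 1 ≤ lenC s' ∧ lenC s' ≤ q1.length := by
    intro s' hs'
    rw [he] at hs'
    rcases List.mem_map.mp (List.mem_of_mem_filter hs') with ⟨x, hx, rfl⟩
    obtain ⟨hx1, hx2, hx3⟩ := hxfact x hx
    rw [hlensl x hx]
    exact ⟨by omega, by omega⟩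
  have henot : ∀ s' ∈ e, ¬ s' ∈ q1.flatMap (fun kl => kl) := by
    intro s' hs' hmem
    have hp := List.of_mem_filter (p := P) (by rw [← he]; exact hs')
    rw [hP] at hp
    simp only [Bool.not_eq_true'] at hp
    rw [Bool.eq_false_iff] at hp
    exact hp ((PySem.Set.contains_iff _ _).mpr ((PySem.Set.mem_ofList _ _).mpr hmem))
  refine ⟨e, e.foldl ucPlace q1, e.foldl (fun dd k => dd.insert k (i : Int)) last, ?_, ?_, ?_, ?_⟩
  · intro all
    rw [astep_eq seq kmax (i : Int) km (by rw [hkm, hn]) q all]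
  · intro acc
    rw [bpos_eq rid seq kmax (i : Int) km (by rw [hkm, hn]) last acc]
    rw [← hxs]
    rw [foldB_eq rid seq (i : Int) last P hi0 xs last acc
      (fun x hx => ⟨(hxfact x hx).1, by rw [← hn]; exact (hxfact x hx).2.1⟩)
      (by rw [hxs]; exact PySem.List.nodup_pyRange_one 1 (km + 1))
      (fun x hx => by
        have ht := test_eq i q last hInv (sl seq (i : Int) x)
        have hxl : ((lenC (sl seq (i : Int) x) : Nat) : Int) = x := by
          rw [hlensl x hx]
          have := (hxfact x hx).1
          omega
        rw [hxl] at ht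
        rw [ht, hP])
      (fun x hx => rfl)]
    rw [he]
    congr 1
    · rw [List.filter_map, List.foldl_map]
      rfl
    · rw [List.filter_map, List.map_map]
      rfl
  · rw [hq1] at hee henot ⊢
    exact inv_step i q last hInv e hee henot
  · rw [foldl_ucPlace_length]
    exact hq1len.2

-- ---- the main induction over positions ----

lemma run_eq (rid seq : String) (kmax : Int) :
    ∀ (k i : Nat), i + k = seq.toList.length →
    ∀ (q : List (List String)) (all : List (List String)) (last : PySem.Dict String Int)
      (acc : List (String × Int × String)),
    QInv i q last → kmax ≤ (q.length : Int) →
    ∃ ls,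
      ((PySem.List.pyRange (i : Int) ((seq.toList.length : Int))).foldl
          (astep seq kmax) (q, all)).2 = all ++ ls ∧
      ((PySem.List.pyRange (i : Int) ((seq.toList.length : Int))).foldl
          (bpos rid seq kmax) (last, acc)).2 = acc ++ tagF rid (i : Int) ls := by
  intro k
  induction k with
  | zero =>
    intro i hi q all last acc _ _
    rw [PySem.List.pyRange_one_eq_nil (by omega : (seq.toList.length : Int) ≤ (i : Int))]
    exact ⟨[], by simp, by simp [tagF]⟩
  | succ k ih =>
    intro i hi q all last acc hInv hlen
    have hin : (i : Int) < (seq.toList.length : Int) := by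
      have : i < seq.toList.length := by omega
      exact_mod_cast this
    rw [PySem.List.pyRange_one_cons hin, List.foldl_cons, List.foldl_cons]
    obtain ⟨e, q', last', hA, hB, hInv', hlen'⟩ :=
      step_all rid seq kmax i q last hInv hlen
    rw [hA all, hB acc]
    obtain ⟨ls, hA2, hB2⟩ := ih (i + 1) (by omega) q' (all ++ [e]) last'
      (acc ++ e.map (fun k => (rid, (i : Int), k))) hInv' hlen'
    rw [show (((i : Nat) + 1 : Nat) : Int) = (i : Int) + 1 by push_cast; ring] at hA2 hB2
    refine ⟨e :: ls, ?_, ?_⟩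
    · rw [hA2, List.append_assoc]
      rfl
    · rw [hB2, List.append_assoc]
      rw [show tagF rid (i : Int) (e :: ls) =
        e.map (fun k => (rid, (i : Int), k)) ++ tagF rid ((i : Int) + 1) ls from rfl]


-- ---- get_kmer_counts = position tagging ----

lemma flatMap_single (e : List String) (f : String → String × Int × String) :
    e.flatMap (fun k => [f k]) = e.map f := by
  induction e with
  | nil => rfl
  | cons k t ih => simp [List.flatMap_cons, ih]

lemma enum_cons (x : List String) (t : List (List String)) (s : Int) :
    PySem.List.enumerate (x :: t) s = (s, x) :: PySem.List.enumerate t (s + 1) := rfl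

lemma counts_aux (rid : String) :
    ∀ (all : List (List String)) (s : Int) (acc : List (String × Int × String)),
    (PySem.List.enumerate all s).foldl
      (fun acc p => p.2.foldl (fun acc2 k => acc2 ++ [(rid, p.1, k)]) acc) acc
    = acc ++ tagF rid s all := by
  intro all
  induction all with
  | nil => intro s acc; simp [PySem.List.enumerate, tagF]
  | cons e t ih =>
    intro s acc
    rw [enum_cons]
    simp only [List.foldl_cons]
    rw [PySem.List.foldl_append_eq_flatMap (fun k => [(rid, s, k)]) e acc]
    rw [ih (s + 1)]
    rw [show tagF rid s (e :: t) = e.map (fun k => (rid, s, k)) ++ tagF rid (s + 1) t from rfl]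
    rw [flatMap_single e (fun k => (rid, s, k)), List.append_assoc]

lemma counts_eq (rid : String) (all : List (List String)) :
    ucGetKmerCounts rid all = tagF rid 0 all := by
  unfold ucGetKmerCounts
  rw [counts_aux rid all 0 []]
  rfl

-- ---- initial state ----

lemma q0_getD (kmax : Int) (b : Nat) :
    ((PySem.List.pyRange 0 kmax).map (fun _ => ([] : List String))).getD b [] = [] := by
  rw [List.getD_eq_getElem?_getD, List.getElem?_map]
  cases h : (PySem.List.pyRange 0 kmax)[b]? <;> simp

lemma inv_init (kmax : Int) :
    QInv 0 ((PySem.List.pyRange 0 kmax).map (fun _ => ([] : List String))) PySem.Dict.empty := by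
  constructor
  · intro b s hs
    rw [q0_getD] at hs
    simp at hs
  · intro s j hj
    rw [PySem.Dict.get?_empty] at hj
    simp at hj

lemma q0_len (kmax : Int) :
    kmax ≤ ((((PySem.List.pyRange 0 kmax).map (fun _ => ([] : List String))).length : Nat) : Int) := by
  rw [List.length_map, PySem.List.length_pyRange_one]
  omega

-- ---- per-reporter equality and the outer fold ----

def bodyA (kmax : Int) (kmer_data : List (String × Int × String)) (p : String × String) :
    List (String × Int × String) :=
  kmer_data ++ ucGetKmerCounts p.1
    (((PySem.List.pyRange 0 (PySem.Str.len p.2)).foldl (astep p.2 kmax) (ucInit kmax)).2)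

def bodyB (kmax : Int) (acc : List (String × Int × String)) (p : String × String) :
    List (String × Int × String) :=
  ((PySem.List.pyRange 0 (PySem.Str.len p.2)).foldl (bpos p.1 p.2 kmax) (PySem.Dict.empty, acc)).2

lemma reporter_eq (kmax : Int) (p : String × String) (acc : List (String × Int × String)) :
    bodyA kmax acc p = bodyB kmax acc p := by
  unfold bodyA bodyB
  rw [PySem.Str.len_eq p.2]
  rw [show ucInit kmax =
    (((PySem.List.pyRange 0 kmax).map (fun _ => ([] : List String))), ([] : List (List String)))
    from rfl]
  obtain ⟨ls, hA, hB⟩ := run_eq p.1 p.2 kmax (p.2.toList.length) 0 (by omega)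
    ((PySem.List.pyRange 0 kmax).map (fun _ => ([] : List String))) [] PySem.Dict.empty acc
    (inv_init kmax) (q0_len kmax)
  rw [Nat.cast_zero] at hA hB
  rw [hA, hB, List.nil_append, counts_eq]

lemma outer_eq (kmax : Int) (rs : List (String × String)) :
    ∀ acc, rs.foldl (bodyA kmax) acc = rs.foldl (bodyB kmax) acc := by
  induction rs with
  | nil => intro acc; rfl
  | cons p t ih =>
    intro acc
    rw [List.foldl_cons, List.foldl_cons, reporter_eq kmax p acc]
    exact ih _


theorem batch_kmers_spec : Claim_equal_batch_kmers := by
  intro reporters kmax _ _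
  unfold Spec_batch_kmers
  have ha : batch_kmers reporters kmax =
      (["reporter_id", "position", "kmer"], reporters.foldl (bodyA kmax) []) := rfl
  have hb : batch_kmers_alt reporters kmax =
      (["reporter_id", "position", "kmer"], reporters.foldl (bodyB kmax) []) := rfl
  rw [ha, hb, outer_eq kmax reporters []]
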